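-- pv_equiv track=rewrite | github.com/MrBrantCode/unitest_baseline | mut_generate/mist_train_taco/taco_8834/solution.py | find_max_tower_sizes
-- ===== SOURCE A (Python) =====
-- def find_max_tower_sizes(t, test_cases):
--     results = []
--
--     for case in test_cases:
--         n, c = case
--         ans = [0] * n
--         prev = [-1] * n
--
--         for j in range(len(c)):
--             color_index = c[j] - 1
--             if prev[color_index] == -1:
--                 prev[color_index] = j
--                 ans[color_index] += 1
--             elif (j - prev[color_index]) % 2 == 1:
--                 prev[color_index] = j
--                 ans[color_index] += 1
--
--         results.append(ans)
--
--     return results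
-- ===== SOURCE B (Python) =====
-- def find_max_tower_sizes(t, test_cases):
--     # Different decomposition: gather each color's occurrence positions in one pass,
--     # then the answer for a color is the number of maximal runs of equal parity
--     # among its positions (= 1 + number of adjacent parity changes); scatter into ans.
--     results = []
--     for n, c in test_cases:
--         positions = {}
--         for j, color in enumerate(c):
--             positions.setdefault(color, []).append(j)
--         ans = [0] * n
--         for color, ps in positions.items():
--             changes = sum(1 for a, b in zip(ps, ps[1:]) if a % 2 != b % 2)
--             ans[color - 1] = 1 + changes
--         results.append(ans)
--     return results
-- ===== Notes on version B (the rewrite author's own statement) =====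
-- stated objective: alternative
-- what changed: Replaces A's single pass over c with prev/ans arrays by a gather-then-count decomposition: one pass builds each color's list of occurrence positions, each color's answer is 1 + the number of adjacent parity changes in that list (its count of maximal equal-parity runs), scattered into a zero-initialized list.
-- outside the precondition, e.g. on find_max_tower_sizes(1, [(1, [1, 0])]): A returns [[2]], B returns [[1]]
import Mathlib
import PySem

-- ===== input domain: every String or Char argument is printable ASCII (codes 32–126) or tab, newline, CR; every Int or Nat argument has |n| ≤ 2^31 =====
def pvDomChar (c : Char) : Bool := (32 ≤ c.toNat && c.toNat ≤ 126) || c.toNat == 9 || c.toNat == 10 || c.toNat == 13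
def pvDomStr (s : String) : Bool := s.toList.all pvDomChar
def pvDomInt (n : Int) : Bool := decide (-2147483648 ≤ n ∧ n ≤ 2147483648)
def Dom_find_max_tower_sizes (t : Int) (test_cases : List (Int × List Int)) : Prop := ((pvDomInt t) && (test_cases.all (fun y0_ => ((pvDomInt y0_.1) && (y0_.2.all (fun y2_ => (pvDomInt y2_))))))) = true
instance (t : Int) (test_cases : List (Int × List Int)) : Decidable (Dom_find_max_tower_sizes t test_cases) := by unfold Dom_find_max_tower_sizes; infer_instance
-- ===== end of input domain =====

-- B replaces A's single prev/ans-array pass by gather-positions-then-count-parity-runs; alternative decomposition, same cost.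

-- ===== PORT A =====
-- one step of A's inner loop; the state is (ans, prev), jc = (j, c[j]).
-- Python list indexing: a negative index wraps once; out of range raises IndexError
-- (those inputs are outside Pre_, the guard only keeps the function total there).
def pvStepA (st : List Int × List Int) (jc : Int × Int) : List Int × List Int :=
  let idx := jc.2 - 1
  let k := (if idx < 0 then idx + st.1.length else idx).toNat
  if idx < -(st.1.length : Int) ∨ (st.1.length : Int) ≤ idx then st
  else if st.2.getD k 0 = -1 then
    (st.1.set k (st.1.getD k 0 + 1), st.2.set k jc.1)
  else if PySem.Int.mod (jc.1 - st.2.getD k 0) 2 = 1 then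
    (st.1.set k (st.1.getD k 0 + 1), st.2.set k jc.1)
  else st

def pvCaseA (case : Int × List Int) : List Int :=
  ((PySem.List.enumerate case.2).foldl pvStepA
    (List.replicate case.1.toNat 0, List.replicate case.1.toNat (-1))).1

def find_max_tower_sizes (t : Int) (test_cases : List (Int × List Int)) : List (List Int) :=
  test_cases.foldl (fun results case => results ++ [pvCaseA case]) []

-- ===== PORT B =====
-- changes = sum(1 for a, b in zip(ps, ps[1:]) if a % 2 != b % 2)
def pvChangesLoop (ps : List Int) : Int :=
  (ps.zip ps.tail).foldl
    (fun s ab => if PySem.Int.mod ab.1 2 ≠ PySem.Int.mod ab.2 2 then s + 1 else s) 0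

-- positions.setdefault(color, []).append(j) is exactly d[color] = d.get(color, []) + [j],
-- i.e. Dict.modify; the scatter ans[color-1] = 1 + changes uses Python's indexing rule
-- (negative wrap; IndexError out of range, outside Pre_, guard for totality only).
def pvCaseB (case : Int × List Int) : List Int :=
  let positions := (PySem.List.enumerate case.2).foldl
    (fun d jc => d.modify jc.2 [] (fun l => l ++ [jc.1])) (PySem.Dict.empty)
  positions.items.foldl (fun ans cp =>
    let idx := cp.1 - 1
    let k := (if idx < 0 then idx + (ans.length : Int) else idx).toNat
    if idx < -(ans.length : Int) ∨ (ans.length : Int) ≤ idx then ans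
    else ans.set k (1 + pvChangesLoop cp.2)) (List.replicate case.1.toNat 0)

def find_max_tower_sizes_alt (t : Int) (test_cases : List (Int × List Int)) : List (List Int) :=
  test_cases.foldl (fun results case => results ++ [pvCaseB case]) []

-- ===== PRECONDITION & SPEC =====
-- Pre_ excludes test cases containing a color outside 1..n: most such entries make A
-- raise IndexError, and entries between 1-n and 0 hit Python's negative-index
-- wraparound, so A accidentally folds that color into another color's slot.
def Pre_find_max_tower_sizes (t : Int) (test_cases : List (Int × List Int)) : Prop :=
  ∀ p ∈ test_cases, ∀ x ∈ p.2, 1 ≤ x ∧ x ≤ p.1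
instance (t : Int) (test_cases : List (Int × List Int)) : Decidable (Pre_find_max_tower_sizes t test_cases) := by unfold Pre_find_max_tower_sizes; infer_instance

def pvWitness_find_max_tower_sizes : Int × (List (Int × List Int)) := (1, [(2, [1, 2, 1, 1])])

def Spec_find_max_tower_sizes (t : Int) (test_cases : List (Int × List Int)) (out : List (List Int)) : Prop := out = find_max_tower_sizes_alt t test_cases
instance (t : Int) (test_cases : List (Int × List Int)) (out : List (List Int)) : Decidable (Spec_find_max_tower_sizes t test_cases out) := by unfold Spec_find_max_tower_sizes; infer_instance

-- ===== CLAIM (what is proved, stated in full; the proofs are below) =====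
def Claim_equal_find_max_tower_sizes : Prop := ∀ (t : Int) (test_cases : List (Int × List Int)), Dom_find_max_tower_sizes t test_cases → Pre_find_max_tower_sizes t test_cases → Spec_find_max_tower_sizes t test_cases (find_max_tower_sizes t test_cases)

-- ===== LEMMAS AND PROOFS =====

-- the occurrence positions of color v in c (what B's dict stores under v)
def pvOccs (v : Int) (c : List Int) : List Int :=
  ((PySem.List.enumerate c).filter (fun jc => jc.2 == v)).map (·.1)

-- A's per-color scalar step: state (cnt, prev)
def pvStepC (s : Int × Int) (j : Int) : Int × Int :=
  if s.2 = -1 then (s.1 + 1, j)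
  else if PySem.Int.mod (j - s.2) 2 = 1 then (s.1 + 1, j) else s

-- number of adjacent parity changes in p :: ps
def pvChanges (p : Int) : List Int → Int
  | [] => 0
  | q :: tl => (if q % 2 = p % 2 then 0 else 1) + pvChanges q tl

theorem pvChanges_congr {p p' : Int} (h : p % 2 = p' % 2) (tl : List Int) :
    pvChanges p tl = pvChanges p' tl := by
  cases tl with
  | nil => rfl
  | cons q tl => simp [pvChanges, h]

theorem pvStepC_changes (ps : List Int) : ∀ (cnt p : Int), 0 ≤ p → (∀ x ∈ ps, 0 ≤ x) →
    (ps.foldl pvStepC (cnt, p)).1 = cnt + pvChanges p ps := by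
  induction ps with
  | nil => intro cnt p _ _; simp [pvChanges]
  | cons q tl ih =>
    intro cnt p hp hall
    have hq : 0 ≤ q := hall q (by simp)
    have htl : ∀ x ∈ tl, 0 ≤ x := fun x hx => hall x (by simp [hx])
    have hne : ((cnt, p) : Int × Int).2 = -1 ↔ False := by simp; omega
    by_cases hpar : q % 2 = p % 2
    · have hstep : pvStepC (cnt, p) q = (cnt, p) := by
        simp [pvStepC, hne]
        omega
      simp only [List.foldl_cons, hstep, pvChanges, if_pos hpar, ih cnt p hp htl,
        pvChanges_congr hpar.symm tl]
      ring
    · have hstep : pvStepC (cnt, p) q = (cnt + 1, q) := by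
        simp [pvStepC, hne]
        omega
      simp only [List.foldl_cons, hstep, pvChanges, if_neg hpar, ih (cnt + 1) q hq htl]
      ring

theorem pvChangesAux (tl : List Int) : ∀ (p acc : Int),
    (((p :: tl).zip tl).foldl
      (fun s ab => if PySem.Int.mod ab.1 2 ≠ PySem.Int.mod ab.2 2 then s + 1 else s) acc)
      = acc + pvChanges p tl := by
  induction tl with
  | nil => intro p acc; simp [pvChanges]
  | cons q tl ih =>
    intro p acc
    have hz : ((p :: q :: tl).zip (q :: tl)) = (p, q) :: ((q :: tl).zip tl) := rfl
    have hm : ∀ x : Int, PySem.Int.mod x 2 = x % 2 :=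
      fun x => PySem.Int.mod_eq_emod_of_pos (by norm_num)
    rw [hz, List.foldl_cons]
    have hhead : (if PySem.Int.mod ((p, q) : Int × Int).1 2 ≠ PySem.Int.mod ((p, q) : Int × Int).2 2
        then acc + 1 else acc) = if p % 2 ≠ q % 2 then acc + 1 else acc := by simp only [hm]
    rw [hhead]
    by_cases hpar : q % 2 = p % 2
    · rw [if_neg (by simp [hpar]), ih q]
      simp [pvChanges, hpar]
    · rw [if_pos (fun h => hpar h.symm), ih q]
      simp [pvChanges, hpar]
      ring

theorem pvChangesLoop_eq (p : Int) (tl : List Int) :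
    pvChangesLoop (p :: tl) = pvChanges p tl := by
  unfold pvChangesLoop
  have : (p :: tl).tail = tl := rfl
  rw [this, pvChangesAux]
  ring


theorem pvGetD_set (l : List Int) (k i : Nat) (x d : Int) (h : k < l.length) :
    (l.set k x).getD i d = if i = k then x else l.getD i d := by
  rcases eq_or_ne i k with rfl | hne
  · simp [List.getD_eq_getElem?_getD, h]
  · simp [List.getD_eq_getElem?_getD, List.getElem?_set_ne (Ne.symm hne), hne]

theorem pvEnum_mem {c : List Int} {s : Int} {jc : Int × Int}
    (h : jc ∈ PySem.List.enumerate c s) : jc.2 ∈ c ∧ s ≤ jc.1 := by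
  induction c generalizing s with
  | nil => simp [PySem.List.enumerate] at h
  | cons x tl ih =>
    simp only [PySem.List.enumerate, List.mem_cons] at h
    rcases h with rfl | h
    · simp
    · rcases ih h with ⟨h1, h2⟩
      exact ⟨List.mem_cons_of_mem _ h1, by omega⟩

theorem pvEnum_map_snd (c : List Int) (s : Int) :
    (PySem.List.enumerate c s).map (·.2) = c := by
  induction c generalizing s with
  | nil => simp [PySem.List.enumerate]
  | cons x tl ih => simp [PySem.List.enumerate, ih]

-- lengths through A's fold
theorem pvStepA_len (st : List Int × List Int) (jc : Int × Int) :
    (pvStepA st jc).1.length = st.1.length ∧ (pvStepA st jc).2.length = st.2.length := by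
  unfold pvStepA
  dsimp only
  split_ifs <;> simp

theorem pvFoldA_len (l : List (Int × Int)) (st : List Int × List Int) :
    (l.foldl pvStepA st).1.length = st.1.length ∧ (l.foldl pvStepA st).2.length = st.2.length := by
  induction l generalizing st with
  | nil => simp
  | cons jc tl ih =>
    simp only [List.foldl_cons]
    rcases ih (pvStepA st jc) with ⟨h1, h2⟩
    rcases pvStepA_len st jc with ⟨g1, g2⟩
    exact ⟨h1.trans g1, h2.trans g2⟩

theorem pvStepA_eq (ans prev : List Int) (jc : Int × Int)
    (hlen : prev.length = ans.length)
    (h1 : 1 ≤ jc.2) (h2 : jc.2 ≤ (ans.length : Int)) :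
    pvStepA (ans, prev) jc =
      (if prev.getD (jc.2 - 1).toNat 0 = -1 ∨
          PySem.Int.mod (jc.1 - prev.getD (jc.2 - 1).toNat 0) 2 = 1 then
        (ans.set (jc.2 - 1).toNat (ans.getD (jc.2 - 1).toNat 0 + 1),
         prev.set (jc.2 - 1).toNat jc.1)
      else (ans, prev)) := by
  unfold pvStepA
  dsimp only
  rw [if_neg (by omega), if_neg (by omega : ¬ jc.2 - 1 < 0)]
  by_cases hp : prev.getD (jc.2 - 1).toNat 0 = -1
  · rw [if_pos hp, if_pos (Or.inl hp)]
  · rw [if_neg hp]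
    by_cases hm : PySem.Int.mod (jc.1 - prev.getD (jc.2 - 1).toNat 0) 2 = 1
    · rw [if_pos hm, if_pos (Or.inr hm)]
    · rw [if_neg hm, if_neg (fun h => h.elim hp hm)]

theorem pvFoldA_getD (l : List (Int × Int)) : ∀ (ans prev : List Int),
    prev.length = ans.length →
    (∀ jc ∈ l, 1 ≤ jc.2 ∧ jc.2 ≤ (ans.length : Int)) →
    ∀ i : Nat, i < ans.length →
    ((l.foldl pvStepA (ans, prev)).1.getD i 0, (l.foldl pvStepA (ans, prev)).2.getD i 0)
      = ((l.filter (fun jc => jc.2 == ((i : Int) + 1))).map (·.1)).foldl pvStepC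
          (ans.getD i 0, prev.getD i 0) := by
  induction l with
  | nil => intro ans prev _ _ i _; simp
  | cons jc tl ih =>
    intro ans prev hlen hall i hi
    obtain ⟨h1, h2⟩ := hall jc (by simp)
    have hk : (jc.2 - 1).toNat < ans.length := by omega
    rw [List.foldl_cons, List.filter_cons, pvStepA_eq ans prev jc hlen h1 h2]
    by_cases hcond : prev.getD (jc.2 - 1).toNat 0 = -1 ∨
        PySem.Int.mod (jc.1 - prev.getD (jc.2 - 1).toNat 0) 2 = 1
    · rw [if_pos hcond]
      rw [ih _ _ (by simp [hlen]) (by intro w hw; simpa using hall w (by simp [hw])) i (by simpa)]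
      by_cases hvi : jc.2 = (i : Int) + 1
      · have hik : (jc.2 - 1).toNat = i := by omega
        rw [hik] at hcond
        rw [if_pos (show (jc.2 == (i : Int) + 1) = true by simp [hvi]),
          List.map_cons, List.foldl_cons]
        congr 1
        rw [hik, pvGetD_set ans i i _ 0 (by omega), pvGetD_set prev i i _ 0 (by omega),
          if_pos rfl, if_pos rfl]
        unfold pvStepC
        dsimp only
        rcases hcond with hp | hm
        · rw [if_pos hp]
        · by_cases hp : prev.getD i 0 = -1
          · rw [if_pos hp]
          · rw [if_neg hp, if_pos hm]
      · have hik : ¬ i = (jc.2 - 1).toNat := by omega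
        rw [if_neg (show ¬ (jc.2 == (i : Int) + 1) = true by simp [hvi])]
        rw [pvGetD_set ans _ i _ 0 hk, pvGetD_set prev _ i _ 0 (by omega),
          if_neg hik, if_neg hik]
    · rw [if_neg hcond]
      rw [ih _ _ hlen (by intro w hw; exact hall w (by simp [hw])) i hi]
      push Not at hcond
      obtain ⟨hp, hm⟩ := hcond
      by_cases hvi : jc.2 = (i : Int) + 1
      · have hik : (jc.2 - 1).toNat = i := by omega
        rw [hik] at hp hm
        rw [if_pos (show (jc.2 == (i : Int) + 1) = true by simp [hvi]),
          List.map_cons, List.foldl_cons]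
        congr 1
        unfold pvStepC
        dsimp only
        rw [if_neg hp, if_neg hm]
      · rw [if_neg (show ¬ (jc.2 == (i : Int) + 1) = true by simp [hvi])]

theorem pvScatter_len (ks : List Int) (G : Int → Int) : ∀ (ans : List Int),
    (ks.foldl (fun ans v =>
      if v - 1 < -(ans.length : Int) ∨ (ans.length : Int) ≤ v - 1 then ans
      else ans.set (if v - 1 < 0 then v - 1 + (ans.length : Int) else v - 1).toNat (G v)) ans).length
      = ans.length := by
  induction ks with
  | nil => intro ans; rfl
  | cons v tl ih =>
    intro ans
    rw [List.foldl_cons, ih]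
    split_ifs <;> simp

theorem pvScatter_getD (ks : List Int) (G : Int → Int) : ∀ (ans : List Int),
    (∀ v ∈ ks, 1 ≤ v ∧ v ≤ (ans.length : Int)) → ∀ i : Nat, i < ans.length →
    (ks.foldl (fun ans v =>
      if v - 1 < -(ans.length : Int) ∨ (ans.length : Int) ≤ v - 1 then ans
      else ans.set (if v - 1 < 0 then v - 1 + (ans.length : Int) else v - 1).toNat (G v)) ans).getD i 0
      = if ((i : Int) + 1) ∈ ks then G ((i : Int) + 1) else ans.getD i 0 := by
  induction ks with
  | nil => intro ans _ i _; simp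
  | cons v tl ih =>
    intro ans hb i hi
    obtain ⟨hv1, hv2⟩ := hb v (by simp)
    rw [List.foldl_cons]
    have hg : ¬ (v - 1 < -(ans.length : Int) ∨ (ans.length : Int) ≤ v - 1) := by omega
    rw [if_neg hg, if_neg (by omega : ¬ v - 1 < 0)]
    set ans' := ans.set (v - 1).toNat (G v) with hans'
    have hlen : ans'.length = ans.length := by simp [hans']
    have hb' : ∀ w ∈ tl, 1 ≤ w ∧ w ≤ (ans'.length : Int) := by
      intro w hw; rw [hlen]; exact hb w (by simp [hw])
    rw [ih ans' hb' i (by omega)]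
    have hset := pvGetD_set ans (v - 1).toNat i (G v) 0 (by omega)
    by_cases hmem : ((i : Int) + 1) ∈ tl
    · simp [hmem]
    · rw [if_neg hmem, hans', hset]
      by_cases hvi : v = (i : Int) + 1
      · rw [if_pos (by omega), if_pos (by simp [hvi]), hvi]
      · rw [if_neg (by omega), if_neg (by simp [hmem]; omega)]

theorem pvOccs_mem_nonneg {v : Int} {c : List Int} {x : Int} (h : x ∈ pvOccs v c) : 0 ≤ x := by
  unfold pvOccs at h
  obtain ⟨jc, hjc, rfl⟩ := List.mem_map.mp h
  exact (pvEnum_mem (List.mem_of_mem_filter hjc)).2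

theorem pvOccs_eq_nil_iff (v : Int) (c : List Int) : pvOccs v c = [] ↔ v ∉ c := by
  unfold pvOccs
  rw [List.map_eq_nil_iff, List.filter_eq_nil_iff]
  constructor
  · intro hf hv
    rw [← pvEnum_map_snd c 0] at hv
    obtain ⟨jc, hjc, rfl⟩ := List.mem_map.mp hv
    exact hf jc hjc (by simp)
  · intro hv jc hjc
    simp only [beq_iff_eq]
    intro hw
    exact hv (hw ▸ (pvEnum_mem hjc).1)

theorem pvCaseA_getD (case : Int × List Int)
    (hcol : ∀ x ∈ case.2, 1 ≤ x ∧ x ≤ (case.1.toNat : Int)) (i : Nat) (hi : i < case.1.toNat) :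
    (pvCaseA case).getD i 0 = if ((i : Int) + 1) ∈ case.2
      then 1 + pvChangesLoop (pvOccs ((i : Int) + 1) case.2) else 0 := by
  unfold pvCaseA
  have hall : ∀ jc ∈ PySem.List.enumerate case.2 0, 1 ≤ jc.2 ∧ jc.2 ≤ ((List.replicate case.1.toNat (0 : Int)).length : Int) := by
    intro jc hjc
    have := hcol jc.2 (pvEnum_mem hjc).1
    simpa using this
  have hmain := pvFoldA_getD (PySem.List.enumerate case.2 0)
    (List.replicate case.1.toNat 0) (List.replicate case.1.toNat (-1))
    (by simp) hall i (by simp only [List.length_replicate]; exact hi)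
  have hfst := congrArg Prod.fst hmain
  simp only at hfst
  rw [hfst]
  have hrep0 : (List.replicate case.1.toNat (0 : Int)).getD i 0 = 0 := by
    simp [List.getD_eq_getElem?_getD, hi]
  have hrep1 : (List.replicate case.1.toNat (-1 : Int)).getD i 0 = -1 := by
    simp [List.getD_eq_getElem?_getD, hi]
  rw [hrep0, hrep1]
  have hocc : (List.map (fun x => x.1)
      (List.filter (fun jc => jc.2 == ((i : Int) + 1)) (PySem.List.enumerate case.2 0)))
      = pvOccs ((i : Int) + 1) case.2 := rfl
  rw [hocc]
  rcases hocc_cases : pvOccs ((i : Int) + 1) case.2 with _ | ⟨p, tl⟩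
  · rw [if_neg ((pvOccs_eq_nil_iff _ _).mp hocc_cases)]
    rfl
  · have hmem : ((i : Int) + 1) ∈ case.2 := by
      by_contra hv
      rw [(pvOccs_eq_nil_iff _ _).mpr hv] at hocc_cases
      cases hocc_cases
    rw [if_pos hmem]
    have hp0 : 0 ≤ p := pvOccs_mem_nonneg (by rw [hocc_cases]; simp)
    have htl : ∀ x ∈ tl, 0 ≤ x := fun x hx =>
      pvOccs_mem_nonneg (v := (i : Int) + 1) (c := case.2) (by rw [hocc_cases]; simp [hx])
    have hfirst : pvStepC (0, -1) p = (1, p) := by unfold pvStepC; simp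
    rw [List.foldl_cons, hfirst, pvStepC_changes tl 1 p hp0 htl, pvChangesLoop_eq]

theorem pvCase_eq (case : Int × List Int)
    (h : ∀ x ∈ case.2, 1 ≤ x ∧ x ≤ case.1) : pvCaseA case = pvCaseB case := by
  have hcol : ∀ x ∈ case.2, 1 ≤ x ∧ x ≤ (case.1.toNat : Int) := by
    intro x hx
    have := h x hx
    omega
  have hpos : (PySem.List.enumerate case.2 0).foldl
      (fun d jc => d.modify jc.2 [] (fun l => l ++ [jc.1])) (PySem.Dict.empty)
      = ((PySem.List.enumerate case.2 0).map (fun jc => (jc.2, jc.1))).foldl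
        (fun d p => d.modify p.1 [] (fun l => l ++ [p.2])) (PySem.Dict.empty) := by
    rw [List.foldl_map]
  have hgetD : ∀ v : Int, ((PySem.List.enumerate case.2 0).foldl
      (fun d jc => d.modify jc.2 [] (fun l => l ++ [jc.1])) (PySem.Dict.empty)).getD v []
      = pvOccs v case.2 := by
    intro v
    rw [hpos, PySem.Dict.getD_foldl_modify_append]
    simp [pvOccs, List.filter_map, List.map_map, Function.comp_def]
  have hkeys : ((PySem.List.enumerate case.2 0).foldl
      (fun d jc => d.modify jc.2 [] (fun l => l ++ [jc.1])) (PySem.Dict.empty)).keys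
      = PySem.Set.ofList case.2 := by
    rw [PySem.Dict.keys_foldl_modify_key (PySem.List.enumerate case.2 0)
      (fun jc => jc.2) [] (fun _ jc l => l ++ [jc.1]) PySem.Dict.empty]
    rw [PySem.Dict.keys_empty, pvEnum_map_snd]
    rfl
  have hnodup : ((PySem.List.enumerate case.2 0).foldl
      (fun d jc => d.modify jc.2 [] (fun l => l ++ [jc.1])) (PySem.Dict.empty)).keys.Nodup := by
    exact PySem.Dict.nodup_keys_foldl_modify_key (PySem.List.enumerate case.2 0)
      (fun jc => jc.2) [] (fun _ jc l => l ++ [jc.1]) PySem.Dict.empty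
      (by rw [PySem.Dict.keys_empty]; exact List.nodup_nil)
  have hitems : ((PySem.List.enumerate case.2 0).foldl
      (fun d jc => d.modify jc.2 [] (fun l => l ++ [jc.1])) (PySem.Dict.empty)).items
      = (PySem.Set.ofList case.2).map (fun k => (k, pvOccs k case.2)) := by
    rw [PySem.Dict.items_eq_map_keys _ hnodup [], hkeys]
    exact List.map_congr_left (fun k _ => by rw [hgetD k])
  have hBfold : pvCaseB case = (PySem.Set.ofList case.2).foldl (fun ans v =>
      if v - 1 < -(ans.length : Int) ∨ (ans.length : Int) ≤ v - 1 then ans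
      else ans.set (if v - 1 < 0 then v - 1 + (ans.length : Int) else v - 1).toNat
        (1 + pvChangesLoop (pvOccs v case.2))) (List.replicate case.1.toNat 0) := by
    unfold pvCaseB
    dsimp only
    rw [hitems, List.foldl_map]
  have hbnd : ∀ v ∈ PySem.Set.ofList case.2,
      1 ≤ v ∧ v ≤ ((List.replicate case.1.toNat (0 : Int)).length : Int) := by
    intro v hv
    have := hcol v ((PySem.Set.mem_ofList case.2 v).mp hv)
    simpa using this
  have hlenA : (pvCaseA case).length = case.1.toNat := by
    unfold pvCaseA
    rw [(pvFoldA_len _ _).1]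
    simp
  have hlenB : (pvCaseB case).length = case.1.toNat := by
    rw [hBfold, pvScatter_len]
    simp
  apply List.ext_getElem (by rw [hlenA, hlenB])
  intro i hA hB
  rw [← List.getD_eq_getElem (pvCaseA case) 0 hA, ← List.getD_eq_getElem (pvCaseB case) 0 hB]
  have hi : i < case.1.toNat := by omega
  rw [pvCaseA_getD case hcol i hi, hBfold,
    pvScatter_getD (PySem.Set.ofList case.2) (fun v => 1 + pvChangesLoop (pvOccs v case.2))
      (List.replicate case.1.toNat 0) hbnd i (by simpa using hi)]
  simp only [PySem.Set.mem_ofList]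
  by_cases hmem : ((i : Int) + 1) ∈ case.2
  · rw [if_pos hmem, if_pos hmem]
  · rw [if_neg hmem, if_neg hmem]
    simp [List.getD_eq_getElem?_getD, hi]

theorem find_max_tower_sizes_spec : Claim_equal_find_max_tower_sizes := by
  intro t tcs _ hpre
  unfold Spec_find_max_tower_sizes
  unfold find_max_tower_sizes find_max_tower_sizes_alt
  rw [PySem.List.foldl_append_singleton_eq_map, PySem.List.foldl_append_singleton_eq_map]
  simp only [List.nil_append]
  exact List.map_congr_left (fun case hc => pvCase_eq case (hpre case hc))
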